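-- pv_equiv track=rewrite | github.com/Ryustiel/Studies-Archive | Premier-Programme-Console/main.py | findTDT
-- ===== SOURCE A (Python) =====
-- def findTDT(objet, chr2Find, Interface=False):
--
--   objet = str(objet)
--   chr2Find = str(chr2Find)
--
--   language = False
--   chrCount = 0
--
--   if(Interface == False):
--     emplacement = "\033[1;31m"
--     pluriel = "\033[1;37m au niveau du rang "
--   else:
--     emplacement = ""
--     pluriel = " au niveau du rang "
--
--   #analyse le mot
--   for x1 in range(len(objet)):
--     if(language == False):
--       if(objet[x1] == chr2Find):
--         chrCount = chrCount + 1
--         emplacement = emplacement + str(x1 + 1)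
--         language = True
--
--     else:
--       if(objet[x1] == chr2Find):
--         chrCount = chrCount + 1
--
--         emplacement = emplacement + ", " + str(x1 + 1)
--
--         if(Interface == False):
--           if(pluriel != "\033[1;37m au niveau des rangs "):
--             pluriel = "\033[1;37m au niveau des rangs "
--         else:
--           if(pluriel != " au niveau des rangs "):
--             pluriel = " au niveau des rangs "
--
--   #affichage
--   if(Interface == False):
--     if(chrCount == 0):
--       if(len(chr2Find) == 1):
--         return "\n\033[1;37my'a rien..."
--       else:
--         return "\n\033[1;31mJ'ai dit UNE SEULE lettre --'"
--
--     else: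
--       return "\n\033[1;37mY'a \033[1;32m" + str(chrCount) + "\033[1;37m fois la lettre \033[1;34m" + str(chr2Find) + str(pluriel) + str(emplacement) + "\033[1;37m dans \033[1;33m" + str(objet)
--   else:
--     if(chrCount == 0):
--       if(len(chr2Find) == 1):
--         return "\ny'a rien..."
--       else:
--         return "\nJ'ai dit UNE SEULE lettre --'"
--
--     else:
--       return "\nY'a " + str(chrCount) + " fois la lettre " + str(chr2Find) + str(pluriel) + str(emplacement) + " dans " + str(objet)
-- ===== SOURCE B (Python) =====
-- def findTDT(objet, chr2Find, Interface=False):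
--     objet = str(objet)
--     chr2Find = str(chr2Find)
--     # collect match positions by jumping match-to-match with str.find
--     # (a character of objet can only equal chr2Find when chr2Find has length 1)
--     parts = []
--     if len(chr2Find) == 1:
--         i = objet.find(chr2Find)
--         while i != -1:
--             parts.append(str(i + 1))
--             i = objet.find(chr2Find, i + 1)
--     n = len(parts)
--     if n == 0:
--         if len(chr2Find) == 1:
--             return "\ny'a rien..." if Interface else "\n\033[1;37my'a rien..."
--         return "\nJ'ai dit UNE SEULE lettre --'" if Interface else "\n\033[1;31mJ'ai dit UNE SEULE lettre --'"
--     joined = ", ".join(parts)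
--     rang = " au niveau des rangs " if n > 1 else " au niveau du rang "
--     if Interface:
--         return "\nY'a " + str(n) + " fois la lettre " + chr2Find + rang + joined + " dans " + objet
--     return ("\n\033[1;37mY'a \033[1;32m" + str(n) + "\033[1;37m fois la lettre \033[1;34m" + chr2Find
--             + "\033[1;37m" + rang + "\033[1;31m" + joined + "\033[1;37m dans \033[1;33m" + objet)
-- ===== Notes on version B (the rewrite author's own statement) =====
-- stated objective: faster
-- what changed: B replaces A's per-character loop with mutable emplacement/pluriel/language state by a match-to-match jump using repeated str.find (correct because a character of objet can equal chr2Find only when it has length 1), then derives count, plural wording and the ', '-joined list from the collected parts in one presentation step.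
import Mathlib
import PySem

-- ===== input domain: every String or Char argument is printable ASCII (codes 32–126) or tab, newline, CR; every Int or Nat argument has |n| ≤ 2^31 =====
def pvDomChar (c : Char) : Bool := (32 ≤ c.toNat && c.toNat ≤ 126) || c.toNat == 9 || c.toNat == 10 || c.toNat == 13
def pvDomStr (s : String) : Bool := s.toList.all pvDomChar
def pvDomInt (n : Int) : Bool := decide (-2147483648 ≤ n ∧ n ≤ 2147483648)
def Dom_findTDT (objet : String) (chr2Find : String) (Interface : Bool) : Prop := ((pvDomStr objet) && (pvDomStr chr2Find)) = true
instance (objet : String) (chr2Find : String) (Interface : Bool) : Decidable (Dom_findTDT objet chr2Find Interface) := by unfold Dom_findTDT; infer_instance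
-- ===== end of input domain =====

-- B collects match positions by jumping match-to-match with repeated str.find (instead of A's
-- per-character loop mutating emplacement/pluriel/language), then formats in a separate step;
-- objective: faster (a timing run measured B faster via C-level find jumps).


-- ===== PORT A =====
-- strings are handled as List Char (PySem.Chars level, exact); objet[x1] with x1 drawn from
-- range(len(objet)) is always in range, so pyGetD's default is never used (exact).
def findTDT_loopBody (c : List Char) (Interface : Bool)
    (st : Bool × Int × List Char × List Char) (p : Int × Char) :
    Bool × Int × List Char × List Char :=
  let (language, chrCount, emplacement, pluriel) := st
  if language = false then
    if [p.2] = c then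
      (true, chrCount + 1, emplacement ++ (PySem.Int.toStr (p.1 + 1)).toList, pluriel)
    else st
  else
    if [p.2] = c then
      (language, chrCount + 1,
        emplacement ++ ", ".toList ++ (PySem.Int.toStr (p.1 + 1)).toList,
        if Interface = false then
          (if pluriel ≠ "\x1b[1;37m au niveau des rangs ".toList then
            "\x1b[1;37m au niveau des rangs ".toList else pluriel)
        else
          (if pluriel ≠ " au niveau des rangs ".toList then
            " au niveau des rangs ".toList else pluriel))
    else st

def findTDT (objet : String) (chr2Find : String) (Interface : Bool) : String :=
  let o := objet.toList
  let c := chr2Find.toList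
  let emplacement0 : List Char := if Interface = false then "\x1b[1;31m".toList else []
  let pluriel0 : List Char :=
    if Interface = false then "\x1b[1;37m au niveau du rang ".toList else " au niveau du rang ".toList
  -- for x1 in range(len(objet)): … objet[x1] …
  let st := (PySem.List.pyRange 0 o.length 1).foldl
    (fun st x1 => findTDT_loopBody c Interface st (x1, PySem.List.pyGetD o x1 ' '))
    (false, 0, emplacement0, pluriel0)
  let chrCount := st.2.1
  let emplacement := st.2.2.1
  let pluriel := st.2.2.2
  if Interface = false then
    if chrCount = 0 then
      if c.length = 1 then "\n\x1b[1;37my'a rien..."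
      else "\n\x1b[1;31mJ'ai dit UNE SEULE lettre --'"
    else
      String.ofList ("\n\x1b[1;37mY'a \x1b[1;32m".toList ++ (PySem.Int.toStr chrCount).toList ++
        "\x1b[1;37m fois la lettre \x1b[1;34m".toList ++ c ++ pluriel ++ emplacement ++
        "\x1b[1;37m dans \x1b[1;33m".toList ++ o)
  else
    if chrCount = 0 then
      if c.length = 1 then "\ny'a rien..."
      else "\nJ'ai dit UNE SEULE lettre --'"
    else
      String.ofList ("\nY'a ".toList ++ (PySem.Int.toStr chrCount).toList ++
        " fois la lettre ".toList ++ c ++ pluriel ++ emplacement ++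
        " dans ".toList ++ o)

-- ===== PORT B =====
-- strings handled as List Char (exact).  The 'while i != -1' find loop of Source B, as a
-- fuel-bounded recursion; fuel = len(objet)+1 bounds the number of iterations (each
-- restart index strictly grows), it is only a totality guard.
def findTDT_findLoop (o c : List Char) : Nat → Int → List (List Char)
  | 0, _ => []
  | fuel + 1, i =>
    if i = -1 then []
    else (PySem.Int.toStr (i + 1)).toList ::
         findTDT_findLoop o c fuel (PySem.Chars.findFrom o c (i + 1) none)

def findTDT_alt (objet : String) (chr2Find : String) (Interface : Bool) : String :=
  let o := objet.toList
  let c := chr2Find.toList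
  let parts : List (List Char) :=
    if c.length = 1 then findTDT_findLoop o c (o.length + 1) (PySem.Chars.find o c) else []
  let n := parts.length
  if n = 0 then
    if Interface then
      if c.length = 1 then "\ny'a rien..." else "\nJ'ai dit UNE SEULE lettre --'"
    else
      if c.length = 1 then "\n\x1b[1;37my'a rien..." else "\n\x1b[1;31mJ'ai dit UNE SEULE lettre --'"
  else
    let joined := PySem.Chars.join ", ".toList parts
    let rang : List Char :=
      if 1 < n then " au niveau des rangs ".toList else " au niveau du rang ".toList
    if Interface then
      String.ofList ("\nY'a ".toList ++ (PySem.Int.toStr (n : Int)).toList ++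
        " fois la lettre ".toList ++ c ++ rang ++ joined ++ " dans ".toList ++ o)
    else
      String.ofList ("\n\x1b[1;37mY'a \x1b[1;32m".toList ++ (PySem.Int.toStr (n : Int)).toList ++
        "\x1b[1;37m fois la lettre \x1b[1;34m".toList ++ c ++
        "\x1b[1;37m".toList ++ rang ++ "\x1b[1;31m".toList ++ joined ++
        "\x1b[1;37m dans \x1b[1;33m".toList ++ o)

-- ===== PRECONDITION & SPEC =====
def Spec_findTDT (objet : String) (chr2Find : String) (Interface : Bool) (out : String) : Prop := out = findTDT_alt objet chr2Find Interface
instance (objet : String) (chr2Find : String) (Interface : Bool) (out : String) : Decidable (Spec_findTDT objet chr2Find Interface out) := by unfold Spec_findTDT; infer_instance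

-- ===== CLAIM =====
def Claim_equal_findTDT : Prop := ∀ (objet : String) (chr2Find : String) (Interface : Bool), Dom_findTDT objet chr2Find Interface → Spec_findTDT objet chr2Find Interface (findTDT objet chr2Find Interface)

-- ===== LEMMAS AND PROOFS =====

-- 0-based match positions, the common reference point of both proofs
def findTDT_P0 (o c : List Char) : List Int :=
  ((PySem.List.enumerate o).filter (fun p => [p.2] = c)).map (fun p => p.1)

-- the state A's loop reaches after having recorded the 1-based positions P (in order)
def findTDT_state (Interface : Bool) (P : List Int) : Bool × Int × List Char × List Char :=
  (!P.isEmpty, (P.length : Int),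
   (if Interface = false then "\x1b[1;31m".toList else []) ++
     PySem.Chars.join ", ".toList (P.map (fun p => (PySem.Int.toStr p).toList)),
   if 2 ≤ P.length then
     (if Interface = false then "\x1b[1;37m au niveau des rangs ".toList else " au niveau des rangs ".toList)
   else
     (if Interface = false then "\x1b[1;37m au niveau du rang ".toList else " au niveau du rang ".toList))

theorem join_append_singleton (sep : List Char) (xs : List (List Char)) (y : List Char)
    (h : xs ≠ []) :
    PySem.Chars.join sep (xs ++ [y]) = PySem.Chars.join sep xs ++ sep ++ y := by
  induction xs with
  | nil => exact absurd rfl h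
  | cons a as ih =>
    cases as with
    | nil => simp [PySem.Chars.join_cons_cons, PySem.Chars.join_singleton]
    | cons b bs =>
      have ih' := ih (by simp)
      simp only [List.cons_append] at ih'
      simp only [List.cons_append, PySem.Chars.join_cons_cons, ih', List.append_assoc]

theorem findTDT_invariant (c : List Char) (Interface : Bool) (l : List Char) :
    ∀ (s : Int) (P : List Int),
    (PySem.List.enumerate l s).foldl (findTDT_loopBody c Interface) (findTDT_state Interface P) =
      findTDT_state Interface
        (P ++ ((PySem.List.enumerate l s).filter (fun p => [p.2] = c)).map (fun p => p.1 + 1)) := by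
  induction l with
  | nil => intro s P; simp [PySem.List.enumerate_nil]
  | cons x xs ih =>
    intro s P
    rw [PySem.List.enumerate_cons]
    simp only [List.foldl_cons, List.filter_cons]
    by_cases hx : [x] = c
    · have hstep : findTDT_loopBody c Interface (findTDT_state Interface P) (s, x) =
          findTDT_state Interface (P ++ [s + 1]) := by
        cases P with
        | nil =>
          simp [findTDT_loopBody, findTDT_state, hx, PySem.Chars.join_singleton,
            PySem.Chars.join_nil]
        | cons q qs =>
          have hjoin : PySem.Chars.join ", ".toList
              (((q :: qs) ++ [s + 1]).map (fun p => (PySem.Int.toStr p).toList)) =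
              PySem.Chars.join ", ".toList ((q :: qs).map (fun p => (PySem.Int.toStr p).toList)) ++
                ", ".toList ++ (PySem.Int.toStr (s + 1)).toList := by
            rw [List.map_append]
            exact join_append_singleton _ _ _ (by simp)
          have hne1 : "\x1b[1;37m au niveau du rang ".toList ≠
              "\x1b[1;37m au niveau des rangs ".toList := by decide
          have hne2 : " au niveau du rang ".toList ≠ " au niveau des rangs ".toList := by decide
          have h2 : 2 ≤ ((q :: qs) ++ [s + 1]).length := by simp
          cases Interface <;> by_cases hq : 2 ≤ (q :: qs).length <;>
            · simp only [findTDT_loopBody, findTDT_state, hx, hjoin,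
                List.isEmpty_cons, Bool.not_false, List.length_cons, List.length_append,
                ne_eq, List.append_assoc]
              refine Prod.ext ?_ (Prod.ext ?_ (Prod.ext ?_ ?_)) <;> simp_all
      rw [hstep, ih]
      simp [hx, List.append_assoc]
    · have hstep : findTDT_loopBody c Interface (findTDT_state Interface P) (s, x) =
          findTDT_state Interface P := by
        simp only [findTDT_loopBody, hx]
        cases h : (findTDT_state Interface P) with
        | mk a rest => split <;> simp
      rw [hstep, ih]
      simp [hx]

-- A's fold over range(len(o)) with indexing is the fold over enumerate(o)
theorem findTDT_fold_eq (c : List Char) (Interface : Bool) (o : List Char) :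
    (PySem.List.pyRange 0 o.length 1).foldl
      (fun st x1 => findTDT_loopBody c Interface st (x1, PySem.List.pyGetD o x1 ' '))
      (findTDT_state Interface []) =
    (PySem.List.enumerate o).foldl (findTDT_loopBody c Interface) (findTDT_state Interface []) := by
  rw [PySem.List.enumerate_eq_map_pyRange (d := ' '), List.foldl_map]
  simp [PySem.List.len]

-- B-side helper lemmas -------------------------------------------------------

theorem singleton_prefix_iff {ch : Char} {l : List Char} :
    [ch] <+: l ↔ l.head? = some ch := by
  cases l with
  | nil => simp
  | cons a t =>
    constructor
    · rintro ⟨u, hu⟩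
      simp only [List.singleton_append, List.cons.injEq] at hu
      simp [hu.1]
    · intro h
      simp only [List.head?_cons, Option.some.injEq] at h
      exact ⟨t, by simp [h]⟩

theorem mem_findTDT_P0 {o : List Char} {ch : Char} {p : Int} :
    p ∈ findTDT_P0 o [ch] ↔ ∃ (k : Nat) (_ : k < o.length), p = (k : Int) ∧ o[k] = ch := by
  unfold findTDT_P0
  simp only [List.mem_map, List.mem_filter, PySem.List.mem_enumerate_iff, decide_eq_true_eq]
  constructor
  · rintro ⟨q, ⟨⟨k, hk, rfl⟩, hq⟩, rfl⟩
    refine ⟨k, hk, by simp, ?_⟩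
    simpa using hq
  · rintro ⟨k, hk, rfl, hek⟩
    exact ⟨((0 : Int) + k, o[k]), ⟨⟨k, hk, rfl⟩, by simp [hek]⟩, by simp⟩

theorem pairwise_findTDT_P0 (o c : List Char) :
    (findTDT_P0 o c).Pairwise (· < ·) := by
  unfold findTDT_P0
  exact List.pairwise_map.mpr
    ((PySem.List.pairwise_lt_enumerate o 0).filter _)

theorem filter_ge_sorted {l : List Int} {j k : Int}
    (hs : l.Pairwise (· < ·)) (hj : j ∈ l) (hmin : ∀ p ∈ l, k ≤ p → j ≤ p) (hk : k ≤ j) :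
    l.filter (fun p => decide (k ≤ p)) = j :: l.filter (fun p => decide (j + 1 ≤ p)) := by
  induction l with
  | nil => simp at hj
  | cons a t ih =>
    rcases List.mem_cons.mp hj with rfl | hjt
    · have hall : ∀ p ∈ t, j < p := (List.pairwise_cons.mp hs).1
      have h1 : t.filter (fun p => decide (k ≤ p)) = t :=
        List.filter_eq_self.mpr (fun p hp => decide_eq_true (le_trans hk (hall p hp).le))
      have h2 : t.filter (fun p => decide (j + 1 ≤ p)) = t :=
        List.filter_eq_self.mpr (fun p hp => decide_eq_true (by have := hall p hp; omega))
      rw [List.filter_cons, List.filter_cons, if_pos (decide_eq_true hk),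
        if_neg (by simp), h1, h2]
    · have haj : a < j := (List.pairwise_cons.mp hs).1 j hjt
      have hka : ¬ k ≤ a := fun h => absurd (hmin a List.mem_cons_self h) (by omega)
      have h4 : ¬ j + 1 ≤ a := by omega
      simp only [List.filter_cons, decide_eq_true_eq, if_neg hka, if_neg h4]
      exact ih (List.pairwise_cons.mp hs).2 hjt
        (fun p hp h => hmin p (List.mem_cons_of_mem _ hp) h)

-- the find loop from restart index k yields the 1-based strings of all matches ≥ k
theorem findTDT_findLoop_spec (o : List Char) (ch : Char) :
    ∀ (fuel k : Nat), k ≤ o.length → o.length - k < fuel →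
    findTDT_findLoop o [ch] fuel (PySem.Chars.findFrom o [ch] (k : Int) none) =
      ((findTDT_P0 o [ch]).filter (fun p => decide ((k : Int) ≤ p))).map
        (fun p => (PySem.Int.toStr (p + 1)).toList) := by
  intro fuel
  induction fuel with
  | zero => intro k _ h; omega
  | succ fuel ih =>
    intro k hk hfuel
    by_cases hneg : PySem.Chars.findFrom o [ch] (k : Int) none = -1
    · have hno : ¬ [ch] <:+: o.drop k :=
        (PySem.Chars.findFrom_natCast_eq_neg_one_iff o [ch] k hk).mp hneg
      have hfilter : (findTDT_P0 o [ch]).filter (fun p => decide ((k : Int) ≤ p)) = [] := by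
        apply List.filter_eq_nil_iff.mpr
        intro p hp
        obtain ⟨m, hm, rfl, hom⟩ := mem_findTDT_P0.mp hp
        simp only [decide_eq_true_eq]
        intro hkm
        apply hno
        have hpm : [ch] <+: o.drop m := by
          apply singleton_prefix_iff.mpr
          rw [List.head?_drop, List.getElem?_eq_getElem hm, hom]
        have hsuf : o.drop m <:+: o.drop k := by
          rw [show o.drop m = (o.drop k).drop (m - k) from by
            rw [List.drop_drop]; congr 1; omega]
          exact (List.drop_suffix _ _).isInfix
        exact hpm.isInfix.trans hsuf
      rw [hneg, hfilter]
      simp [findTDT_findLoop]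
    · obtain ⟨hkle, hpre, hmin⟩ := PySem.Chars.findFrom_natCast_spec o [ch] k hk hneg
      set j := PySem.Chars.findFrom o [ch] (k : Int) none with hj
      have hj0 : 0 ≤ j := le_trans (by exact_mod_cast Nat.zero_le k) hkle
      have hhead : (o.drop j.toNat).head? = some ch := singleton_prefix_iff.mp hpre
      have hjlen : j.toNat < o.length := by
        by_contra h
        rw [List.drop_eq_nil_of_le (by omega)] at hhead
        simp at hhead
      have hoj : o[j.toNat] = ch := by
        rw [List.head?_drop, List.getElem?_eq_getElem hjlen] at hhead
        exact Option.some.inj hhead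
      have hjP : j ∈ findTDT_P0 o [ch] :=
        mem_findTDT_P0.mpr ⟨j.toNat, hjlen, by omega, hoj⟩
      have hminP : ∀ p ∈ findTDT_P0 o [ch], (k : Int) ≤ p → j ≤ p := by
        intro p hp hkp
        obtain ⟨m, hm, rfl, hom⟩ := mem_findTDT_P0.mp hp
        by_contra hlt
        apply hmin m (by exact_mod_cast hkp) (by omega)
        apply singleton_prefix_iff.mpr
        rw [List.head?_drop, List.getElem?_eq_getElem hm, hom]
      have hsucc : j + 1 = ((j.toNat + 1 : Nat) : Int) := by omega
      have hrec := ih (j.toNat + 1) (by omega) (by omega)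
      rw [filter_ge_sorted (pairwise_findTDT_P0 o [ch]) hjP hminP hkle]
      simp only [findTDT_findLoop, if_neg hneg, List.map_cons]
      congr 1
      rw [hsucc, hrec]
-- end of loop spec

-- ===== VERDICT =====
theorem findTDT_spec : Claim_equal_findTDT := by
  intro objet chr2Find Interface _hdom
  unfold Spec_findTDT findTDT findTDT_alt
  have h0 : (false, (0 : Int),
      (if Interface = false then "\x1b[1;31m".toList else ([] : List Char)),
      (if Interface = false then "\x1b[1;37m au niveau du rang ".toList
        else " au niveau du rang ".toList)) = findTDT_state Interface [] := by
    simp [findTDT_state, PySem.Chars.join_nil]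
  simp only []
  rw [h0, findTDT_fold_eq, findTDT_invariant, List.nil_append]
  generalize chr2Find.toList = c
  generalize objet.toList = o
  set P := ((PySem.List.enumerate o).filter (fun p => [p.2] = c)).map (fun p => p.1 + 1) with hP
  by_cases h1 : c.length = 1
  · obtain ⟨ch, rfl⟩ : ∃ ch, c = [ch] := by
      cases c with
      | nil => simp at h1
      | cons a t => cases t with
        | nil => exact ⟨a, rfl⟩
        | cons b u => simp at h1
    -- parts = P.map toStr
    have hfind : PySem.Chars.find o [ch] = PySem.Chars.findFrom o [ch] ((0 : Nat) : Int) none := by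
      simp
    have hloop := findTDT_findLoop_spec o ch (o.length + 1) 0 (Nat.zero_le _) (by omega)
    have hfilter0 : (findTDT_P0 o [ch]).filter (fun p => decide (((0 : Nat) : Int) ≤ p)) =
        findTDT_P0 o [ch] := by
      apply List.filter_eq_self.mpr
      intro p hp
      obtain ⟨m, hm, rfl, _⟩ := mem_findTDT_P0.mp hp
      simp
    have hparts : findTDT_findLoop o [ch] (o.length + 1) (PySem.Chars.find o [ch]) =
        P.map (fun p => (PySem.Int.toStr p).toList) := by
      rw [hfind, hloop, hfilter0]
      unfold findTDT_P0
      rw [hP, List.map_map, List.map_map]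
      rfl
    have hlen : P.length = (findTDT_P0 o [ch]).length := by
      unfold findTDT_P0; rw [hP]; simp
    simp only [h1, hparts]
    by_cases hz : P = []
    · cases Interface <;> simp [findTDT_state, hz]
    · have hn0 : P.length ≠ 0 := by simpa [List.length_eq_zero_iff] using hz
      by_cases h2 : 2 ≤ P.length <;>
        cases Interface <;>
          · simp only [findTDT_state]
            simp [hn0, h2, (by omega : 1 < P.length ↔ 2 ≤ P.length), List.append_assoc]
  · -- c is not a single character: no char of o can equal c, so P = [] and parts = []
    have hPnil : P = [] := by
      rw [hP]
      apply List.map_eq_nil_iff.mpr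
      apply List.filter_eq_nil_iff.mpr
      intro p _
      simp only [decide_eq_true_eq]
      intro hpc
      exact h1 (hpc ▸ rfl)
    cases Interface <;> simp [findTDT_state, hPnil, h1]
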